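-- pv_equiv track=rewrite | github.com/reza0310/wishlist | scripts/preprocessor/preprocessor.py | ident
-- ===== SOURCE A (Python) =====
-- def ident(content: str, prefix: str, skip: int = 1) -> str:
--     result = ""
--     for line in content.splitlines(keepends=True):
--         if skip > 0:
--             skip -= 1
--             result += line
--         else:
--             result += prefix + line
--     return result
-- ===== SOURCE B (Python) =====
-- def ident(content: str, prefix: str, skip: int = 1) -> str:
--     # Character-level state machine: no line splitting; walk the characters once,
--     # emitting the prefix at each line start once the skip budget is exhausted.
--     out = []
--     at_start = True
--     remaining = skip
--     i = 0
--     n = len(content)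
--     while i < n:
--         if at_start:
--             if remaining > 0:
--                 remaining -= 1
--             else:
--                 out.append(prefix)
--         c = content[i]
--         if c == '\r':
--             if i + 1 < n and content[i + 1] == '\n':
--                 out.append('\r\n')
--                 i += 1
--             else:
--                 out.append('\r')
--             at_start = True
--         elif c == '\n':
--             out.append('\n')
--             at_start = True
--         else:
--             out.append(c)
--             at_start = False
--         i += 1
--     return ''.join(out)
-- ===== Notes on version B (the rewrite author's own statement) =====
-- stated objective: alternative
-- what changed: Replaced A's splitlines-then-loop (accumulating a line at a time with a decrementing skip counter) by a character-level state machine: one pass over the characters with an at-line-start flag and a skip budget, emitting the prefix at each line start and handling \r\n by lookahead, with no line list ever built.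
import Mathlib
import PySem

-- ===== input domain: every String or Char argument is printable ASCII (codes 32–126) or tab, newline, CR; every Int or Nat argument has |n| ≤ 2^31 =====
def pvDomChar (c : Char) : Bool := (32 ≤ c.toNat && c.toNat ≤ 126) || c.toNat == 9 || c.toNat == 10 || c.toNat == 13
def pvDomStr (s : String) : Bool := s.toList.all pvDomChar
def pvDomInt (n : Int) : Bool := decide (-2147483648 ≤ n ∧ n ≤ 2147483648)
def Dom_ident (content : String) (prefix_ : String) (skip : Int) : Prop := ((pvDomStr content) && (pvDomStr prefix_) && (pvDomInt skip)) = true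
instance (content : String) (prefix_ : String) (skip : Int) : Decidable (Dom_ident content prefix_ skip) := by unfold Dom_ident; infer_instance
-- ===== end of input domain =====

-- B replaces A's line-splitting accumulator loop by a single character-level state machine
-- (at-line-start flag + skip budget), a different decomposition of the same task.


-- ===== PORT A =====
-- content.splitlines(keepends=True), ported by hand (PySem.Str.splitlines drops the endings):
-- line boundaries are '\r\n', '\n', '\r' — exact on the ASCII domain (no \x0b/\x0c/… there).
def splitKeep : List Char → List (List Char)
  | [] => []
  | '\r' :: '\n' :: rest => ['\r', '\n'] :: splitKeep rest
  | '\n' :: rest => ['\n'] :: splitKeep rest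
  | '\r' :: rest => ['\r'] :: splitKeep rest
  | c :: rest =>
    match splitKeep rest with
    | [] => [[c]]
    | l :: ls => (c :: l) :: ls

def ident (content : String) (prefix_ : String) (skip : Int) : String :=
  String.ofList
    ((splitKeep content.toList).foldl
      (fun (st : List Char × Int) line =>
        if st.2 > 0 then (st.1 ++ line, st.2 - 1)
        else (st.1 ++ prefix_.toList ++ line, st.2))
      ([], skip)).1

-- ===== PORT B =====
-- Source B's while-loop state machine, as a recursion over the characters: at line start
-- (atStart = true) the prefix is emitted unless the skip budget is still positive
-- (stepPre), in which case the budget is decremented (stepRem); '\r\n' is consumed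
-- as one line ending, exactly as Source B's lookahead does.
def stepPre (p : List Char) (atStart : Bool) (rem : Int) : List Char :=
  if atStart then (if rem > 0 then [] else p) else []

def stepRem (atStart : Bool) (rem : Int) : Int :=
  if atStart ∧ rem > 0 then rem - 1 else rem

def scanB (p : List Char) : Bool → Int → List Char → List Char
  | _, _, [] => []
  | atStart, rem, '\r' :: '\n' :: rest =>
      stepPre p atStart rem ++ '\r' :: '\n' :: scanB p true (stepRem atStart rem) rest
  | atStart, rem, '\n' :: rest =>
      stepPre p atStart rem ++ '\n' :: scanB p true (stepRem atStart rem) rest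
  | atStart, rem, '\r' :: rest =>
      stepPre p atStart rem ++ '\r' :: scanB p true (stepRem atStart rem) rest
  | atStart, rem, c :: rest =>
      stepPre p atStart rem ++ c :: scanB p false (stepRem atStart rem) rest

def ident_alt (content : String) (prefix_ : String) (skip : Int) : String :=
  String.ofList (scanB prefix_.toList true skip content.toList)

-- ===== PRECONDITION & SPEC =====
def Spec_ident (content : String) (prefix_ : String) (skip : Int) (out : String) : Prop := out = ident_alt content prefix_ skip
instance (content : String) (prefix_ : String) (skip : Int) (out : String) : Decidable (Spec_ident content prefix_ skip out) := by unfold Spec_ident; infer_instance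

-- ===== CLAIM (what is proved, stated in full; the proofs are below) =====
def Claim_equal_ident : Prop := ∀ (content : String) (prefix_ : String) (skip : Int), Dom_ident content prefix_ skip → Spec_ident content prefix_ skip (ident content prefix_ skip)

-- ===== LEMMAS AND PROOFS =====

-- The take/drop normal form both ports are reduced to.
def segForm (p : List Char) (lines : List (List Char)) (skip : Int) : List Char :=
  (lines.take (max skip 0).toNat).flatten
    ++ (lines.drop (max skip 0).toNat).flatMap (fun line => p ++ line)

theorem ident_loop (p : List Char) (lines : List (List Char)) :
    ∀ (skip : Int) (acc : List Char),
      (lines.foldl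
        (fun (st : List Char × Int) line =>
          if st.2 > 0 then (st.1 ++ line, st.2 - 1)
          else (st.1 ++ p ++ line, st.2))
        (acc, skip)).1
      = acc ++ segForm p lines skip := by
  induction lines with
  | nil => intro skip acc; simp [segForm]
  | cons l ls ih =>
    intro skip acc
    by_cases h : skip > 0
    · have hk : (max skip 0).toNat = (max (skip - 1) 0).toNat + 1 := by omega
      simp only [List.foldl_cons, if_pos h, ih (skip - 1) (acc ++ l), segForm, hk,
        List.take_succ_cons, List.drop_succ_cons, List.flatten_cons]
      simp [List.append_assoc]
    · have hk : (max skip 0).toNat = 0 := by omega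
      simp only [List.foldl_cons, if_neg h, ih skip (acc ++ p ++ l), segForm, hk,
        List.take_zero, List.drop_zero, List.flatten_nil, List.flatMap_cons]
      simp [List.append_assoc]

theorem segForm_cons_pos (p l : List Char) (ls : List (List Char)) (skip : Int)
    (h : skip > 0) :
    segForm p (l :: ls) skip = l ++ segForm p ls (skip - 1) := by
  have hk : (max skip 0).toNat = (max (skip - 1) 0).toNat + 1 := by omega
  simp [segForm, hk, List.append_assoc]

theorem segForm_cons_nonpos (p l : List Char) (ls : List (List Char)) (skip : Int)
    (h : ¬ skip > 0) :
    segForm p (l :: ls) skip = p ++ l ++ segForm p ls skip := by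
  have hk : (max skip 0).toNat = 0 := by omega
  have hk' : List.take (max skip 0).toNat (l :: ls) = [] := by rw [hk]; rfl
  simp [segForm, hk, List.append_assoc]

theorem scanB_segForm (p : List Char) :
    ∀ cs : List Char,
      (∀ skip : Int, scanB p true skip cs = segForm p (splitKeep cs) skip) ∧
      (∀ rem : Int,
        scanB p false rem cs =
          match splitKeep cs with
          | [] => []
          | l :: ls => l ++ segForm p ls rem) := by
  intro cs
  induction cs using splitKeep.induct with
  | case1 => constructor <;> intro k <;> simp [scanB, splitKeep, segForm]
  | case2 rest ih =>
    obtain ⟨ihT, _⟩ := ih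
    constructor
    · intro skip
      by_cases h : skip > 0
      · simp [scanB, splitKeep, stepPre, stepRem, h, ihT, segForm_cons_pos _ _ _ _ h]
      · simp [scanB, splitKeep, stepPre, stepRem, h, ihT, segForm_cons_nonpos _ _ _ _ h]
    · intro rem
      simp [scanB, splitKeep, stepPre, stepRem, ihT]
  | case3 rest ih =>
    obtain ⟨ihT, _⟩ := ih
    constructor
    · intro skip
      by_cases h : skip > 0
      · simp [scanB, splitKeep, stepPre, stepRem, h, ihT, segForm_cons_pos _ _ _ _ h]
      · simp [scanB, splitKeep, stepPre, stepRem, h, ihT, segForm_cons_nonpos _ _ _ _ h]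
    · intro rem
      simp [scanB, splitKeep, stepPre, stepRem, ihT]
  | case4 rest h1 ih =>
    obtain ⟨ihT, _⟩ := ih
    have hne : ∀ rest', rest ≠ '\n' :: rest' := fun r e => h1 r e
    constructor
    · intro skip
      by_cases h : skip > 0
      · simp [scanB, splitKeep, stepPre, stepRem, h, ihT, segForm_cons_pos _ _ _ _ h]
      · simp [scanB, splitKeep, stepPre, stepRem, h, ihT, segForm_cons_nonpos _ _ _ _ h]
    · intro rem
      simp [scanB, splitKeep, stepPre, stepRem, ihT]
  | case5 c rest h1 h2 h3 hs ih =>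
    obtain ⟨_, ihF⟩ := ih
    have hc2 : c ≠ '\n' := fun e => h2 e
    have hc3 : c ≠ '\r' := fun e => h3 e
    constructor
    · intro skip
      by_cases h : skip > 0
      · obtain ⟨m, hm⟩ : ∃ m, (max skip 0).toNat = m + 1 :=
          ⟨(max skip 0).toNat - 1, by omega⟩
        simp [scanB, splitKeep, stepPre, stepRem, h, ihF, hs, segForm, hm]
      · have hk : (max skip 0).toNat = 0 := by omega
        simp [scanB, splitKeep, stepPre, stepRem, h, ihF, hs, segForm, hk]
    · intro rem
      simp [scanB, splitKeep, stepPre, stepRem, ihF, hs, segForm]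
  | case6 c rest h1 h2 h3 l ls hs ih =>
    obtain ⟨_, ihF⟩ := ih
    have hc2 : c ≠ '\n' := fun e => h2 e
    have hc3 : c ≠ '\r' := fun e => h3 e
    constructor
    · intro skip
      by_cases h : skip > 0
      · simp [scanB, splitKeep, stepPre, stepRem, h, ihF, hs,
          segForm_cons_pos _ _ _ _ h]
      · simp [scanB, splitKeep, stepPre, stepRem, h, ihF, hs,
          segForm_cons_nonpos _ _ _ _ h]
    · intro rem
      simp [scanB, splitKeep, stepPre, stepRem, ihF, hs]

-- ===== VERDICT (by name: the statement is the Claim_ definition above) =====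
theorem ident_spec : Claim_equal_ident := by
  intro content prefix_ skip _
  show ident content prefix_ skip = ident_alt content prefix_ skip
  unfold ident ident_alt
  rw [ident_loop prefix_.toList (splitKeep content.toList) skip [],
    (scanB_segForm prefix_.toList content.toList).1 skip]
  simp
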